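-- pv_equiv track=rewrite | github.com/Sharan41/Medscribe-AI | backend/scripts/collect_examples.py | _classify_condition
-- ===== SOURCE A (Python) =====
-- from typing import List, Dict, Optional
--
-- def _classify_condition(soap_note: Dict) -> str:
--     """Classify condition type from SOAP note"""
--     assessment = soap_note.get("assessment", "").lower()
--
--     if any(term in assessment for term in ["fever", "cough", "respiratory", "pneumonia", "urti", "bronchitis"]):
--         return "respiratory"
--     elif any(term in assessment for term in ["abdominal", "gastritis", "diarrhea", "stomach", "gastro"]):
--         return "gastrointestinal"
--     elif any(term in assessment for term in ["hypertension", "heart", "cardiac", "chest pain", "cardiovascular"]):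
--         return "cardiovascular"
--     elif any(term in assessment for term in ["headache", "seizure", "neurological", "tension"]):
--         return "neurological"
--     elif any(term in assessment for term in ["joint", "muscle", "back pain", "arthritis", "musculoskeletal"]):
--         return "musculoskeletal"
--     elif any(term in assessment for term in ["diabetes", "thyroid", "hormone", "endocrine", "diabetic"]):
--         return "endocrine"
--     elif any(term in assessment for term in ["rash", "skin", "dermatological", "dermatitis"]):
--         return "dermatological"
--     else:
--         return "general"
-- ===== SOURCE B (Python) =====
-- # B: text-driven scan — walk the assessment once by position, look up each fixed-length
-- # substring in a term->priority hash, and keep the minimum priority seen (A is pattern-driven).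
-- _CATEGORIES = ["respiratory", "gastrointestinal", "cardiovascular", "neurological",
--                "musculoskeletal", "endocrine", "dermatological"]
--
-- _TERM_PRIORITY = {}
-- for _i, _terms in enumerate([
--         ["fever", "cough", "respiratory", "pneumonia", "urti", "bronchitis"],
--         ["abdominal", "gastritis", "diarrhea", "stomach", "gastro"],
--         ["hypertension", "heart", "cardiac", "chest pain", "cardiovascular"],
--         ["headache", "seizure", "neurological", "tension"],
--         ["joint", "muscle", "back pain", "arthritis", "musculoskeletal"],
--         ["diabetes", "thyroid", "hormone", "endocrine", "diabetic"],
--         ["rash", "skin", "dermatological", "dermatitis"]]):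
--     for _t in _terms:
--         _TERM_PRIORITY[_t] = _i
--
-- _TERM_LENS = sorted({len(_t) for _t in _TERM_PRIORITY})
--
-- def _classify_condition(soap_note):
--     text = soap_note.get("assessment", "").lower()
--     n = len(text)
--     best = len(_CATEGORIES)
--     for i in range(n):
--         for L in _TERM_LENS:
--             if i + L > n:
--                 break
--             p = _TERM_PRIORITY.get(text[i:i + L])
--             if p is not None and p < best:
--                 best = p
--     return _CATEGORIES[best] if best < len(_CATEGORIES) else "general"
-- ===== Notes on version B (the rewrite author's own statement) =====
-- stated objective: alternative
-- what changed: Replaces the pattern-driven if/elif cascade (substring search per keyword group) with a text-driven single scan: every fixed-length window of the lowercased assessment is looked up in a term-to-priority hash and the minimum matched priority selects the category.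
import Mathlib
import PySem

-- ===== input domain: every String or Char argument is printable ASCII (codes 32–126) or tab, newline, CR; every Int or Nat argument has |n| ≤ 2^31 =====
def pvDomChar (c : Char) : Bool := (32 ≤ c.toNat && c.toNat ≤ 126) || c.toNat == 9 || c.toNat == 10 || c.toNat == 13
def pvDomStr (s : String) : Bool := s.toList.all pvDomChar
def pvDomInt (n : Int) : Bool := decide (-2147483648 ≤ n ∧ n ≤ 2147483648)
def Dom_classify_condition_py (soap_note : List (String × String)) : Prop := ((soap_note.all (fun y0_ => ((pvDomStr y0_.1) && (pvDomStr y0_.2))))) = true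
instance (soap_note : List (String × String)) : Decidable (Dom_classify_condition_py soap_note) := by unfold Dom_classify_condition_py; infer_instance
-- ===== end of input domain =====

-- B replaces A's pattern-driven if/elif cascade by a text-driven scan: each fixed-length
-- window of the lowercased assessment is looked up in a term→priority map and the minimum
-- matched priority selects the category (alternative decomposition, similar cost).

-- ===== PORT A =====
def classify_condition_py (soap_note : List (String × String)) : String :=
  let assessment := PySem.Str.lower (PySem.Dict.getD ⟨soap_note⟩ "assessment" "")
  if (["fever", "cough", "respiratory", "pneumonia", "urti", "bronchitis"].any
      (fun term => PySem.Str.isIn term assessment)) then "respiratory"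
  else if (["abdominal", "gastritis", "diarrhea", "stomach", "gastro"].any
      (fun term => PySem.Str.isIn term assessment)) then "gastrointestinal"
  else if (["hypertension", "heart", "cardiac", "chest pain", "cardiovascular"].any
      (fun term => PySem.Str.isIn term assessment)) then "cardiovascular"
  else if (["headache", "seizure", "neurological", "tension"].any
      (fun term => PySem.Str.isIn term assessment)) then "neurological"
  else if (["joint", "muscle", "back pain", "arthritis", "musculoskeletal"].any
      (fun term => PySem.Str.isIn term assessment)) then "musculoskeletal"
  else if (["diabetes", "thyroid", "hormone", "endocrine", "diabetic"].any
      (fun term => PySem.Str.isIn term assessment)) then "endocrine"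
  else if (["rash", "skin", "dermatological", "dermatitis"].any
      (fun term => PySem.Str.isIn term assessment)) then "dermatological"
  else "general"

-- ===== PORT B =====
def pvCategories : List String :=
  ["respiratory", "gastrointestinal", "cardiovascular", "neurological",
   "musculoskeletal", "endocrine", "dermatological"]

-- _TERM_PRIORITY: term → index of its category (strings as List Char per convention)
def pvTermPriority : PySem.Dict (List Char) Int :=
  ⟨[("fever".toList, 0), ("cough".toList, 0), ("respiratory".toList, 0), ("pneumonia".toList, 0),
    ("urti".toList, 0), ("bronchitis".toList, 0),
    ("abdominal".toList, 1), ("gastritis".toList, 1), ("diarrhea".toList, 1), ("stomach".toList, 1),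
    ("gastro".toList, 1),
    ("hypertension".toList, 2), ("heart".toList, 2), ("cardiac".toList, 2), ("chest pain".toList, 2),
    ("cardiovascular".toList, 2),
    ("headache".toList, 3), ("seizure".toList, 3), ("neurological".toList, 3), ("tension".toList, 3),
    ("joint".toList, 4), ("muscle".toList, 4), ("back pain".toList, 4), ("arthritis".toList, 4),
    ("musculoskeletal".toList, 4),
    ("diabetes".toList, 5), ("thyroid".toList, 5), ("hormone".toList, 5), ("endocrine".toList, 5),
    ("diabetic".toList, 5),
    ("rash".toList, 6), ("skin".toList, 6), ("dermatological".toList, 6), ("dermatitis".toList, 6)]⟩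

-- _TERM_LENS = sorted({len(t) for t in _TERM_PRIORITY})
def pvTermLens : List Int := [4, 5, 6, 7, 8, 9, 10, 11, 12, 14, 15]

-- inner 'for L in _TERM_LENS: if i+L > n: break; …' loop
def pvScanAt (text : List Char) (i : Int) : List Int → Int → Int
  | [], best => best
  | L :: rest, best =>
    if (text.length : Int) < i + L then best
    else
      match PySem.Dict.get? pvTermPriority (PySem.List.slice text (some i) (some (i + L))) with
      | some p => pvScanAt text i rest (if p < best then p else best)
      | none => pvScanAt text i rest best

def pvBest (text : List Char) : Int :=
  (PySem.List.pyRange 0 (text.length : Int) 1).foldl (fun best i => pvScanAt text i pvTermLens best) 7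

def classify_condition_py_alt (soap_note : List (String × String)) : String :=
  let text := PySem.Chars.lower (PySem.Dict.getD ⟨soap_note⟩ "assessment" "").toList
  let best := pvBest text
  if best < 7 then PySem.List.pyGetD pvCategories best "" else "general"

-- ===== PRECONDITION & SPEC =====
def Spec_classify_condition_py (soap_note : List (String × String)) (out : String) : Prop := out = classify_condition_py_alt soap_note
instance (soap_note : List (String × String)) (out : String) : Decidable (Spec_classify_condition_py soap_note out) := by unfold Spec_classify_condition_py; infer_instance

-- ===== CLAIM (what is proved, stated in full; the proofs are below) =====
def Claim_equal_classify_condition_py : Prop := ∀ (soap_note : List (String × String)), Dom_classify_condition_py soap_note → Spec_classify_condition_py soap_note (classify_condition_py soap_note)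

-- ===== LEMMAS AND PROOFS =====

-- category c's keyword list (A's c-th branch)
def pvGroup (c : Int) : List String :=
  if c = 0 then ["fever", "cough", "respiratory", "pneumonia", "urti", "bronchitis"]
  else if c = 1 then ["abdominal", "gastritis", "diarrhea", "stomach", "gastro"]
  else if c = 2 then ["hypertension", "heart", "cardiac", "chest pain", "cardiovascular"]
  else if c = 3 then ["headache", "seizure", "neurological", "tension"]
  else if c = 4 then ["joint", "muscle", "back pain", "arthritis", "musculoskeletal"]
  else if c = 5 then ["diabetes", "thyroid", "hormone", "endocrine", "diabetic"]
  else if c = 6 then ["rash", "skin", "dermatological", "dermatitis"]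
  else []

-- A's c-th boolean, on the list-of-chars side
def pvMatch (text : List Char) (c : Int) : Bool :=
  (pvGroup c).any (fun term => PySem.Chars.isIn term.toList text)

-- soundness predicate: best is 7 or the priority of some term occurring in text
def pvP (text : List Char) (b : Int) : Prop :=
  b = 7 ∨ ∃ t, PySem.Dict.get? pvTermPriority t = some b ∧ PySem.Chars.isIn t text = true

lemma pvKeyFacts : ∀ pr ∈ pvTermPriority.items,
    pr.1 ≠ [] ∧ ((pr.1.length : Int) ∈ pvTermLens) ∧ 0 ≤ pr.2 ∧ pr.2 < 7 ∧
    pr.1 ∈ (pvGroup pr.2).map String.toList := by decide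

lemma pvLensSorted : pvTermLens.Pairwise (· ≤ ·) := by decide

lemma pvGroupGet : ∀ c : Int, 0 ≤ c → c < 7 → ∀ term ∈ pvGroup c,
    PySem.Dict.get? pvTermPriority term.toList = some c := by
  intro c h1 h2
  interval_cases c <;> decide

lemma pvScanAt_le (text : List Char) (i : Int) :
    ∀ (ls : List Int) (best : Int), pvScanAt text i ls best ≤ best := by
  intro ls
  induction ls with
  | nil => intro best; simp [pvScanAt]
  | cons L rest ih =>
    intro best
    simp only [pvScanAt]
    split
    · exact le_refl best
    · split
      · rename_i p _
        calc pvScanAt text i rest (if p < best then p else best)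
            ≤ (if p < best then p else best) := ih _
          _ ≤ best := by split <;> omega
      · exact ih best

lemma pvScanAt_complete (text : List Char) (i : Int) :
    ∀ (ls : List Int) (best L p : Int), ls.Pairwise (· ≤ ·) → L ∈ ls →
    i + L ≤ (text.length : Int) →
    PySem.Dict.get? pvTermPriority (PySem.List.slice text (some i) (some (i + L))) = some p →
    pvScanAt text i ls best ≤ p := by
  intro ls
  induction ls with
  | nil => intro _ _ _ _ hmem; simp at hmem
  | cons L' rest ih =>
    intro best L p hpw hmem hle hget
    have hpw' := (List.pairwise_cons.mp hpw)
    rcases List.mem_cons.mp hmem with rfl | hmem'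
    · simp only [pvScanAt]
      rw [if_neg (by omega)]
      rw [hget]
      calc pvScanAt text i rest (if p < best then p else best)
          ≤ (if p < best then p else best) := pvScanAt_le text i rest _
        _ ≤ p := by split <;> omega
    · have hL'L : L' ≤ L := hpw'.1 L hmem'
      simp only [pvScanAt]
      rw [if_neg (by omega)]
      split
      · exact ih _ L p hpw'.2 hmem' hle hget
      · exact ih _ L p hpw'.2 hmem' hle hget

lemma pvScanAt_sound (text : List Char) (i : Int) (hi : 0 ≤ i) :
    ∀ (ls : List Int) (best : Int), (∀ L ∈ ls, 0 < L) → pvP text best →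
    pvP text (pvScanAt text i ls best) := by
  intro ls
  induction ls with
  | nil => intro best _ hP; simpa [pvScanAt] using hP
  | cons L rest ih =>
    intro best hpos hP
    simp only [pvScanAt]
    split
    · exact hP
    · rename_i hnb
      rw [not_lt] at hnb
      split
      · rename_i p hget
        refine ih _ (fun L' h => hpos L' (List.mem_cons_of_mem _ h)) ?_
        by_cases hpb : p < best
        · rw [if_pos hpb]
          right
          refine ⟨PySem.List.slice text (some i) (some (i + L)), hget, ?_⟩
          have hL : 0 < L := hpos L (List.mem_cons_self ..)
          rw [PySem.List.slice_toNat text hi (by omega)]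
          rw [PySem.Chars.isIn_iff_infix]
          exact (List.take_prefix _ _).isInfix.trans (List.drop_suffix _ _).isInfix
        · rw [if_neg hpb]; exact hP
      · exact ih _ (fun L' h => hpos L' (List.mem_cons_of_mem _ h)) hP

lemma pvOuter_le (text : List Char) :
    ∀ (l : List Int) (best : Int),
      l.foldl (fun b i => pvScanAt text i pvTermLens b) best ≤ best := by
  intro l
  induction l with
  | nil => intro best; simp
  | cons i rest ih =>
    intro best
    calc rest.foldl (fun b i => pvScanAt text i pvTermLens b) (pvScanAt text i pvTermLens best)
        ≤ pvScanAt text i pvTermLens best := ih _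
      _ ≤ best := pvScanAt_le text i _ best

lemma pvOuter_complete (text : List Char) :
    ∀ (l : List Int) (best i L p : Int), i ∈ l → L ∈ pvTermLens →
    i + L ≤ (text.length : Int) →
    PySem.Dict.get? pvTermPriority (PySem.List.slice text (some i) (some (i + L))) = some p →
    l.foldl (fun b i => pvScanAt text i pvTermLens b) best ≤ p := by
  intro l
  induction l with
  | nil => intro _ _ _ _ hmem; simp at hmem
  | cons j rest ih =>
    intro best i L p hmem hL hle hget
    rcases List.mem_cons.mp hmem with rfl | hmem'
    · calc rest.foldl (fun b i => pvScanAt text i pvTermLens b) (pvScanAt text i pvTermLens best)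
          ≤ pvScanAt text i pvTermLens best := pvOuter_le text rest _
        _ ≤ p := pvScanAt_complete text i pvTermLens best L p pvLensSorted hL hle hget
    · exact ih _ i L p hmem' hL hle hget

lemma pvOuter_sound (text : List Char) :
    ∀ (l : List Int) (best : Int), (∀ i ∈ l, 0 ≤ i) → pvP text best →
    pvP text (l.foldl (fun b i => pvScanAt text i pvTermLens b) best) := by
  intro l
  induction l with
  | nil => intro best _ hP; simpa using hP
  | cons i rest ih =>
    intro best hnn hP
    refine ih _ (fun j h => hnn j (List.mem_cons_of_mem _ h)) ?_
    exact pvScanAt_sound text i (hnn i (List.mem_cons_self ..)) pvTermLens best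
      (by decide) hP

lemma pvBest_le7 (text : List Char) : pvBest text ≤ 7 := pvOuter_le text _ 7

lemma pvBest_sound (text : List Char) : pvP text (pvBest text) := by
  refine pvOuter_sound text _ 7 (fun i h => ?_) (Or.inl rfl)
  exact ((PySem.List.mem_pyRange_one).mp h).1

-- if a dict term occurs in text, the final best is at most its priority
lemma pvBest_complete (text : List Char) (t : List Char) (p : Int)
    (hget : PySem.Dict.get? pvTermPriority t = some p)
    (hin : PySem.Chars.isIn t text = true) : pvBest text ≤ p := by
  have hfacts := pvKeyFacts (t, p) (PySem.Dict.mem_items_of_get?_eq_some _ hget)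
  obtain ⟨hne, hlen, _, _, _⟩ := hfacts
  obtain ⟨j, hpre⟩ := (PySem.Chars.exists_prefix_drop_iff_isIn t text).mpr hin
  have hjlen : j + t.length ≤ text.length := by
    have h1 := hpre.length_le
    have h2 : (text.drop j).length = text.length - j := List.length_drop ..
    by_cases hj : j ≤ text.length
    · omega
    · exfalso
      have : text.drop j = [] := List.drop_eq_nil_of_le (by omega)
      rw [this] at hpre
      exact hne (List.prefix_nil.mp hpre)
  have ht0 : 0 < t.length := List.length_pos_iff.mpr hne
  have hmem : (j : Int) ∈ PySem.List.pyRange 0 (text.length : Int) 1 := by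
    rw [PySem.List.mem_pyRange_one]
    constructor
    · exact_mod_cast Int.natCast_nonneg j
    · exact_mod_cast (by omega : j < text.length)
  have hslice : PySem.List.slice text (some (j : Int)) (some ((j : Int) + (t.length : Int))) = t := by
    rw [PySem.List.slice_natCast_add]
    exact (List.prefix_iff_eq_take.mp hpre).symm
  refine pvOuter_complete text _ 7 (j : Int) (t.length : Int) p hmem ?_ (by exact_mod_cast hjlen) ?_
  · exact hlen
  · rw [hslice]; exact hget

-- if A's c-th branch fires, best ≤ c
lemma pvBest_le_of_match (text : List Char) (c : Int) (h0 : 0 ≤ c) (h7 : c < 7)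
    (hm : pvMatch text c = true) : pvBest text ≤ c := by
  obtain ⟨term, hterm, hin⟩ := List.any_eq_true.mp hm
  exact pvBest_complete text term.toList c (pvGroupGet c h0 h7 term hterm) hin

-- the exact value of best from A's booleans
lemma pvBest_eq (text : List Char) (c : Int) (h0 : 0 ≤ c) (h7 : c < 7)
    (hm : pvMatch text c = true)
    (hlow : ∀ c', 0 ≤ c' → c' < c → pvMatch text c' = false) : pvBest text = c := by
  have hle := pvBest_le_of_match text c h0 h7 hm
  rcases pvBest_sound text with h7' | ⟨t, hget, hin⟩
  · omega
  · obtain ⟨hne, _, hb0, hb7, hgrp⟩ := pvKeyFacts (t, pvBest text)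
      (PySem.Dict.mem_items_of_get?_eq_some _ hget)
    by_contra hne'
    have hlt : pvBest text < c := by omega
    have : pvMatch text (pvBest text) = true := by
      obtain ⟨term, hterm, heq⟩ := List.mem_map.mp hgrp
      exact List.any_eq_true.mpr ⟨term, hterm, by rw [heq]; exact hin⟩
    rw [hlow _ hb0 hlt] at this
    exact Bool.false_ne_true this

lemma pvBest_eq7 (text : List Char)
    (hlow : ∀ c', 0 ≤ c' → c' < 7 → pvMatch text c' = false) : pvBest text = 7 := by
  have hle := pvBest_le7 text
  rcases pvBest_sound text with h7' | ⟨t, hget, hin⟩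
  · exact h7'
  · obtain ⟨hne, _, hb0, hb7, hgrp⟩ := pvKeyFacts (t, pvBest text)
      (PySem.Dict.mem_items_of_get?_eq_some _ hget)
    exfalso
    have : pvMatch text (pvBest text) = true := by
      obtain ⟨term, hterm, heq⟩ := List.mem_map.mp hgrp
      exact List.any_eq_true.mpr ⟨term, hterm, by rw [heq]; exact hin⟩
    rw [hlow _ hb0 hb7] at this
    exact Bool.false_ne_true this

-- ===== VERDICT (by name: the statement is the Claim_ definition above) =====
set_option maxHeartbeats 1600000 in
theorem classify_condition_py_spec : Claim_equal_classify_condition_py := by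
  intro s _
  unfold Spec_classify_condition_py classify_condition_py classify_condition_py_alt
  simp only [PySem.Str.isIn_eq, PySem.Str.toList_lower]
  set text := PySem.Chars.lower (PySem.Dict.getD ⟨s⟩ "assessment" "").toList with htext
  by_cases h0 : ((["fever", "cough", "respiratory", "pneumonia", "urti", "bronchitis"]).any (fun term => PySem.Chars.isIn term.toList text)) = true
  · -- branch 0
    rw [pvBest_eq text 0 (by omega) (by omega) h0 (by intro c' a b; omega)]
    simp [h0, pvCategories, PySem.List.pyGetD, PySem.List.pyGet?, PySem.List.pyIdx?]
  by_cases h1 : ((["abdominal", "gastritis", "diarrhea", "stomach", "gastro"]).any (fun term => PySem.Chars.isIn term.toList text)) = true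
  · have f0 : (["fever", "cough", "respiratory", "pneumonia", "urti", "bronchitis"]).any (fun term => PySem.Chars.isIn term.toList text) = false := (Bool.not_eq_true _).mp h0
    rw [pvBest_eq text 1 (by omega) (by omega) h1 (by intro c' a b; interval_cases c' <;> first | exact (Bool.not_eq_true _).mp h0)]
    simp [f0, h1, pvCategories, PySem.List.pyGetD, PySem.List.pyGet?, PySem.List.pyIdx?]
  by_cases h2 : ((["hypertension", "heart", "cardiac", "chest pain", "cardiovascular"]).any (fun term => PySem.Chars.isIn term.toList text)) = true
  · have f0 : (["fever", "cough", "respiratory", "pneumonia", "urti", "bronchitis"]).any (fun term => PySem.Chars.isIn term.toList text) = false := (Bool.not_eq_true _).mp h0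
    have f1 : (["abdominal", "gastritis", "diarrhea", "stomach", "gastro"]).any (fun term => PySem.Chars.isIn term.toList text) = false := (Bool.not_eq_true _).mp h1
    rw [pvBest_eq text 2 (by omega) (by omega) h2 (by intro c' a b; interval_cases c' <;> first | exact (Bool.not_eq_true _).mp h0 | exact (Bool.not_eq_true _).mp h1)]
    simp [f0, f1, h2, pvCategories, PySem.List.pyGetD, PySem.List.pyGet?, PySem.List.pyIdx?]
  by_cases h3 : ((["headache", "seizure", "neurological", "tension"]).any (fun term => PySem.Chars.isIn term.toList text)) = true
  · have f0 : (["fever", "cough", "respiratory", "pneumonia", "urti", "bronchitis"]).any (fun term => PySem.Chars.isIn term.toList text) = false := (Bool.not_eq_true _).mp h0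
    have f1 : (["abdominal", "gastritis", "diarrhea", "stomach", "gastro"]).any (fun term => PySem.Chars.isIn term.toList text) = false := (Bool.not_eq_true _).mp h1
    have f2 : (["hypertension", "heart", "cardiac", "chest pain", "cardiovascular"]).any (fun term => PySem.Chars.isIn term.toList text) = false := (Bool.not_eq_true _).mp h2
    rw [pvBest_eq text 3 (by omega) (by omega) h3 (by intro c' a b; interval_cases c' <;> first | exact (Bool.not_eq_true _).mp h0 | exact (Bool.not_eq_true _).mp h1 | exact (Bool.not_eq_true _).mp h2)]
    simp [f0, f1, f2, h3, pvCategories, PySem.List.pyGetD, PySem.List.pyGet?, PySem.List.pyIdx?]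
  by_cases h4 : ((["joint", "muscle", "back pain", "arthritis", "musculoskeletal"]).any (fun term => PySem.Chars.isIn term.toList text)) = true
  · have f0 : (["fever", "cough", "respiratory", "pneumonia", "urti", "bronchitis"]).any (fun term => PySem.Chars.isIn term.toList text) = false := (Bool.not_eq_true _).mp h0
    have f1 : (["abdominal", "gastritis", "diarrhea", "stomach", "gastro"]).any (fun term => PySem.Chars.isIn term.toList text) = false := (Bool.not_eq_true _).mp h1
    have f2 : (["hypertension", "heart", "cardiac", "chest pain", "cardiovascular"]).any (fun term => PySem.Chars.isIn term.toList text) = false := (Bool.not_eq_true _).mp h2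
    have f3 : (["headache", "seizure", "neurological", "tension"]).any (fun term => PySem.Chars.isIn term.toList text) = false := (Bool.not_eq_true _).mp h3
    rw [pvBest_eq text 4 (by omega) (by omega) h4 (by intro c' a b; interval_cases c' <;> first | exact (Bool.not_eq_true _).mp h0 | exact (Bool.not_eq_true _).mp h1 | exact (Bool.not_eq_true _).mp h2 | exact (Bool.not_eq_true _).mp h3)]
    simp [f0, f1, f2, f3, h4, pvCategories, PySem.List.pyGetD, PySem.List.pyGet?, PySem.List.pyIdx?]
  by_cases h5 : ((["diabetes", "thyroid", "hormone", "endocrine", "diabetic"]).any (fun term => PySem.Chars.isIn term.toList text)) = true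
  · have f0 : (["fever", "cough", "respiratory", "pneumonia", "urti", "bronchitis"]).any (fun term => PySem.Chars.isIn term.toList text) = false := (Bool.not_eq_true _).mp h0
    have f1 : (["abdominal", "gastritis", "diarrhea", "stomach", "gastro"]).any (fun term => PySem.Chars.isIn term.toList text) = false := (Bool.not_eq_true _).mp h1
    have f2 : (["hypertension", "heart", "cardiac", "chest pain", "cardiovascular"]).any (fun term => PySem.Chars.isIn term.toList text) = false := (Bool.not_eq_true _).mp h2
    have f3 : (["headache", "seizure", "neurological", "tension"]).any (fun term => PySem.Chars.isIn term.toList text) = false := (Bool.not_eq_true _).mp h3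
    have f4 : (["joint", "muscle", "back pain", "arthritis", "musculoskeletal"]).any (fun term => PySem.Chars.isIn term.toList text) = false := (Bool.not_eq_true _).mp h4
    rw [pvBest_eq text 5 (by omega) (by omega) h5 (by intro c' a b; interval_cases c' <;> first | exact (Bool.not_eq_true _).mp h0 | exact (Bool.not_eq_true _).mp h1 | exact (Bool.not_eq_true _).mp h2 | exact (Bool.not_eq_true _).mp h3 | exact (Bool.not_eq_true _).mp h4)]
    simp [f0, f1, f2, f3, f4, h5, pvCategories, PySem.List.pyGetD, PySem.List.pyGet?, PySem.List.pyIdx?]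
  by_cases h6 : ((["rash", "skin", "dermatological", "dermatitis"]).any (fun term => PySem.Chars.isIn term.toList text)) = true
  · have f0 : (["fever", "cough", "respiratory", "pneumonia", "urti", "bronchitis"]).any (fun term => PySem.Chars.isIn term.toList text) = false := (Bool.not_eq_true _).mp h0
    have f1 : (["abdominal", "gastritis", "diarrhea", "stomach", "gastro"]).any (fun term => PySem.Chars.isIn term.toList text) = false := (Bool.not_eq_true _).mp h1
    have f2 : (["hypertension", "heart", "cardiac", "chest pain", "cardiovascular"]).any (fun term => PySem.Chars.isIn term.toList text) = false := (Bool.not_eq_true _).mp h2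
    have f3 : (["headache", "seizure", "neurological", "tension"]).any (fun term => PySem.Chars.isIn term.toList text) = false := (Bool.not_eq_true _).mp h3
    have f4 : (["joint", "muscle", "back pain", "arthritis", "musculoskeletal"]).any (fun term => PySem.Chars.isIn term.toList text) = false := (Bool.not_eq_true _).mp h4
    have f5 : (["diabetes", "thyroid", "hormone", "endocrine", "diabetic"]).any (fun term => PySem.Chars.isIn term.toList text) = false := (Bool.not_eq_true _).mp h5
    rw [pvBest_eq text 6 (by omega) (by omega) h6 (by intro c' a b; interval_cases c' <;> first | exact (Bool.not_eq_true _).mp h0 | exact (Bool.not_eq_true _).mp h1 | exact (Bool.not_eq_true _).mp h2 | exact (Bool.not_eq_true _).mp h3 | exact (Bool.not_eq_true _).mp h4 | exact (Bool.not_eq_true _).mp h5)]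
    simp [f0, f1, f2, f3, f4, f5, h6, pvCategories, PySem.List.pyGetD, PySem.List.pyGet?, PySem.List.pyIdx?]
  have f0 : (["fever", "cough", "respiratory", "pneumonia", "urti", "bronchitis"]).any (fun term => PySem.Chars.isIn term.toList text) = false := (Bool.not_eq_true _).mp h0
  have f1 : (["abdominal", "gastritis", "diarrhea", "stomach", "gastro"]).any (fun term => PySem.Chars.isIn term.toList text) = false := (Bool.not_eq_true _).mp h1
  have f2 : (["hypertension", "heart", "cardiac", "chest pain", "cardiovascular"]).any (fun term => PySem.Chars.isIn term.toList text) = false := (Bool.not_eq_true _).mp h2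
  have f3 : (["headache", "seizure", "neurological", "tension"]).any (fun term => PySem.Chars.isIn term.toList text) = false := (Bool.not_eq_true _).mp h3
  have f4 : (["joint", "muscle", "back pain", "arthritis", "musculoskeletal"]).any (fun term => PySem.Chars.isIn term.toList text) = false := (Bool.not_eq_true _).mp h4
  have f5 : (["diabetes", "thyroid", "hormone", "endocrine", "diabetic"]).any (fun term => PySem.Chars.isIn term.toList text) = false := (Bool.not_eq_true _).mp h5
  have f6 : (["rash", "skin", "dermatological", "dermatitis"]).any (fun term => PySem.Chars.isIn term.toList text) = false := (Bool.not_eq_true _).mp h6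
  rw [pvBest_eq7 text (by intro c' a b; interval_cases c' <;> first | exact (Bool.not_eq_true _).mp h0 | exact (Bool.not_eq_true _).mp h1 | exact (Bool.not_eq_true _).mp h2 | exact (Bool.not_eq_true _).mp h3 | exact (Bool.not_eq_true _).mp h4 | exact (Bool.not_eq_true _).mp h5 | exact (Bool.not_eq_true _).mp h6)]
  simp [f0, f1, f2, f3, f4, f5, f6]
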